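-- pv_equiv track=rewrite | github.com/keepitreall89/BattleshipPy | generator2.py | findRightPointer
-- ===== SOURCE A (Python) =====
-- def findRightPointer(current, maxValues):
-- 	if len(current)!=len(maxValues):
-- 		return 0
-- 	i = len(current)-1
-- 	while i>=0:
-- 		if current[i]!=maxValues[i]:
-- 			return i
--
-- 		i = i - 1
-- 	return i
-- ===== SOURCE B (Python) =====
-- def findRightPointer(current, maxValues):
--     if len(current) != len(maxValues):
--         return 0
--     result = -1
--     for i, (x, y) in enumerate(zip(current, maxValues)):
--         if x != y:
--             result = i
--     return result
-- ===== Notes on version B (the rewrite author's own statement) =====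
-- stated objective: alternative
-- what changed: Replaces A's right-to-left early-exit while loop with manual indexing by a single left-to-right enumerate-over-zip pass that keeps overwriting the last mismatch index in an accumulator.
import Mathlib
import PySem

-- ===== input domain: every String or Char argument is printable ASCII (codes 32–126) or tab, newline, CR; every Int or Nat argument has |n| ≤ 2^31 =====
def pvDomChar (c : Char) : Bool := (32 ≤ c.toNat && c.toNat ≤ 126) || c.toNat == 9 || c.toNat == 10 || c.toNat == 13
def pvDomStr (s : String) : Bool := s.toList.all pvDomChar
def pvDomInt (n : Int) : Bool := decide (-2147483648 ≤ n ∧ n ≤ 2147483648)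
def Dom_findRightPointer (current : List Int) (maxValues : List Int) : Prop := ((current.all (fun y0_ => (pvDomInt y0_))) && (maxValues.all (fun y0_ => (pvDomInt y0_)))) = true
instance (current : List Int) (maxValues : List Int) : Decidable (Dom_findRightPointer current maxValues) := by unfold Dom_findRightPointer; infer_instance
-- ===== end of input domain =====

-- B replaces A's right-to-left early-exit while loop (manual indexing) with a single
-- left-to-right enumerate-over-zip pass that overwrites a last-mismatch accumulator
-- (objective: alternative decomposition, same O(n) cost).

-- ===== PORT A =====
-- the 'while i>=0' loop of A, recursing on the Nat n = i+1 (n = 0 means i = -1, return i)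
def pvLoopA (current : List Int) (maxValues : List Int) : Nat → Int
  | 0 => -1
  | n + 1 =>
    if PySem.List.pyGetD current (n : Int) 0 ≠ PySem.List.pyGetD maxValues (n : Int) 0 then (n : Int)
    else pvLoopA current maxValues n

def findRightPointer (current : List Int) (maxValues : List Int) : Int :=
  if current.length ≠ maxValues.length then 0
  else pvLoopA current maxValues current.length

-- ===== PORT B =====
def findRightPointer_alt (current : List Int) (maxValues : List Int) : Int :=
  if current.length ≠ maxValues.length then 0
  else
    (PySem.List.enumerate (current.zip maxValues)).foldl
      (fun result p => if p.2.1 ≠ p.2.2 then p.1 else result) (-1)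

-- ===== PRECONDITION & SPEC =====
def Spec_findRightPointer (current : List Int) (maxValues : List Int) (out : Int) : Prop := out = findRightPointer_alt current maxValues
instance (current : List Int) (maxValues : List Int) (out : Int) : Decidable (Spec_findRightPointer current maxValues out) := by unfold Spec_findRightPointer; infer_instance

-- ===== CLAIM (what is proved, stated in full; the proofs are below) =====
def Claim_equal_findRightPointer : Prop := ∀ (current : List Int) (maxValues : List Int), Dom_findRightPointer current maxValues → Spec_findRightPointer current maxValues (findRightPointer current maxValues)

-- ===== LEMMAS AND PROOFS =====

-- B's forward fold over the first n enumerated pairs equals A's downward scan from index n-1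
theorem pvLoop_eq_foldl_take (current maxValues : List Int) (n : Nat)
    (hn : n ≤ (current.zip maxValues).length) :
    pvLoopA current maxValues n =
      ((PySem.List.enumerate (current.zip maxValues)).take n).foldl
        (fun result p => if p.2.1 ≠ p.2.2 then p.1 else result) (-1) := by
  induction n with
  | zero => simp [pvLoopA]
  | succ k ih =>
    have hk : k < (current.zip maxValues).length := by omega
    have htake :
        (PySem.List.enumerate (current.zip maxValues)).take (k + 1) =
          (PySem.List.enumerate (current.zip maxValues)).take k ++
            [(PySem.List.enumerate (current.zip maxValues))[k]'(by
              simpa [PySem.List.length_enumerate] using hk)] := by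
      exact List.take_succ_eq_append_getElem (by simpa [PySem.List.length_enumerate] using hk)
    have hget :
        (PySem.List.enumerate (current.zip maxValues))[k]'(by
            simpa [PySem.List.length_enumerate] using hk) =
          ((k : Int), (current.zip maxValues)[k]'hk) := by
      simpa using PySem.List.getElem_enumerate (xs := current.zip maxValues) (s := 0) (k := k)
        (by simpa [PySem.List.length_enumerate] using hk)
    have hzip : (current.zip maxValues)[k]'hk =
        (current[k]'(by simpa using (List.lt_length_left_of_zip hk)),
         maxValues[k]'(by simpa using (List.lt_length_right_of_zip hk))) := by
      simp
    have hc : PySem.List.pyGetD current (k : Int) 0 = current[k]'(by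
        simpa using (List.lt_length_left_of_zip hk)) := by
      rw [PySem.List.pyGetD_natCast]
      exact List.getD_eq_getElem _ _ _
    have hm : PySem.List.pyGetD maxValues (k : Int) 0 = maxValues[k]'(by
        simpa using (List.lt_length_right_of_zip hk)) := by
      rw [PySem.List.pyGetD_natCast]
      exact List.getD_eq_getElem _ _ _
    rw [htake, List.foldl_append, ← ih (by omega)]
    simp only [List.foldl_cons, List.foldl_nil, hget, hzip]
    by_cases h : current[k]'(by simpa using (List.lt_length_left_of_zip hk)) =
        maxValues[k]'(by simpa using (List.lt_length_right_of_zip hk))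
    · simp [pvLoopA, hc, hm, h]
    · simp [pvLoopA, hc, hm, h]

-- ===== VERDICT (by name: the statement is the Claim_ definition above) =====
theorem findRightPointer_spec : Claim_equal_findRightPointer := by
  intro current maxValues _
  unfold Spec_findRightPointer findRightPointer findRightPointer_alt
  by_cases hlen : current.length = maxValues.length
  · simp only [hlen, ne_eq, not_true_eq_false, if_false]
    have hz : (current.zip maxValues).length = maxValues.length := by
      simp [List.length_zip, hlen]
    have := pvLoop_eq_foldl_take current maxValues maxValues.length (by omega)
    rw [this, List.take_of_length_le (by simp [PySem.List.length_enumerate, hz])]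
  · simp [hlen]
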